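-- pv_equiv track=rewrite | github.com/basilwhite/ivn | ivn_fuzzy_match.py | infer_alignment
-- ===== SOURCE A (Python) =====
-- def infer_alignment(enabling, dependent):
--     """
--     Infers if enabling causally supports dependent, per IVN logic.
--     Returns (justification, score) or (None, None) if not aligned.
--     """
--     # Lowercase for easier matching
--     e, d = enabling.lower(), dependent.lower()
--     # Example heuristics (expand as needed)
--     # 1. Look for causal verbs in enabling
--     causal_verbs = ['enable', 'support', 'provide', 'supply', 'reduce', 'improve', 'accelerate', 'facilitate', 'ensure', 'deliver']
--     if any(verb in e for verb in causal_verbs):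
--         justification = f"{enabling} provides a critical input or reduces risk for {dependent}"
--         score = 85
--     # 2. Look for shared outcome/priority/law keywords
--     elif any(word in e and word in d for word in ['compliance', 'risk', 'speed', 'law', 'performance', 'priority', 'outcome']):
--         justification = f"Both components serve a shared outcome or legal requirement"
--         score = 75
--     # 3. If enabling missing, would dependent be degraded? (simple heuristic: enabling is a prerequisite)
--     elif any(phrase in e for phrase in ['guidance', 'policy', 'training', 'infrastructure', 'funding']):
--         justification = f"{enabling} is a prerequisite for effective delivery of {dependent}"
--         score = 70
--     else:
--         # No clear causal/transactive link
--         return None, None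
--     return justification, score
-- ===== SOURCE B (Python) =====
-- _CAUSAL = ('enable', 'support', 'provide', 'supply', 'reduce', 'improve', 'accelerate', 'facilitate', 'ensure', 'deliver')
-- _SHARED = ('compliance', 'risk', 'speed', 'law', 'performance', 'priority', 'outcome')
-- _PREREQ = ('guidance', 'policy', 'training', 'infrastructure', 'funding')
-- _ALL = _CAUSAL + _SHARED + _PREREQ
--
--
-- def _hits(s, keywords):
--     """One left-to-right scan of s: at each position, collect every keyword that starts there."""
--     found = set()
--     for i in range(len(s) + 1):
--         for kw in keywords:
--             if kw not in found and s.startswith(kw, i):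
--                 found.add(kw)
--     return found
--
--
-- def infer_alignment(enabling, dependent):
--     e, d = enabling.lower(), dependent.lower()
--     he = _hits(e, _ALL)  # all 22 keywords collected in a single scan of e
--     if he & set(_CAUSAL):
--         return f"{enabling} provides a critical input or reduces risk for {dependent}", 85
--     if he & set(_SHARED) & _hits(d, _SHARED):
--         return "Both components serve a shared outcome or legal requirement", 75
--     if he & set(_PREREQ):
--         return f"{enabling} is a prerequisite for effective delivery of {dependent}", 70
--     return None, None
-- ===== Notes on version B (the rewrite author's own statement) =====
-- stated objective: alternative
-- what changed: Instead of A's keyword-driven if/elif chain of repeated 'in' substring searches, B merges the three keyword lists into one table and makes a single position-driven left-to-right scan of the lowercased string, collecting every keyword that starts at each position into a hit set, then decides the tier by set intersections.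
import Mathlib
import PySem

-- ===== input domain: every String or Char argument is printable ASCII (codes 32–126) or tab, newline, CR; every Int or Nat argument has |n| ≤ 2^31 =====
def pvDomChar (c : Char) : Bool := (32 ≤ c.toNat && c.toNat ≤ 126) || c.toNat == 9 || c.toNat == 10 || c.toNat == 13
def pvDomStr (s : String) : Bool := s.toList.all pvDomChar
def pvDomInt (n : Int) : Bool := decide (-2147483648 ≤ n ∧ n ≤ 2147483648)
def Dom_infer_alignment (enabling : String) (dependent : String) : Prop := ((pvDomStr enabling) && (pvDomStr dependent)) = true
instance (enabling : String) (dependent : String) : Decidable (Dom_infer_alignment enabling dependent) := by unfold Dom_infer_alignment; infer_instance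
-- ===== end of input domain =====

-- B replaces A's keyword-driven if/elif substring searches by one position-driven scan
-- collecting all keyword hits into a set, then tier selection by set intersection (objective: alternative).


-- ===== PORT A =====
def infer_alignment (enabling : String) (dependent : String) : Option String × Option Int :=
  let e := PySem.Str.lower enabling
  let d := PySem.Str.lower dependent
  let causal_verbs := ["enable", "support", "provide", "supply", "reduce", "improve", "accelerate", "facilitate", "ensure", "deliver"]
  if causal_verbs.any (fun verb => PySem.Str.isIn verb e) then
    (some (enabling ++ " provides a critical input or reduces risk for " ++ dependent), some 85)
  else if ["compliance", "risk", "speed", "law", "performance", "priority", "outcome"].any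
      (fun word => PySem.Str.isIn word e && PySem.Str.isIn word d) then
    (some "Both components serve a shared outcome or legal requirement", some 75)
  else if ["guidance", "policy", "training", "infrastructure", "funding"].any
      (fun phrase => PySem.Str.isIn phrase e) then
    (some (enabling ++ " is a prerequisite for effective delivery of " ++ dependent), some 70)
  else
    (none, none)

-- ===== PORT B =====
def pvCausal : List String := ["enable", "support", "provide", "supply", "reduce", "improve", "accelerate", "facilitate", "ensure", "deliver"]
def pvShared : List String := ["compliance", "risk", "speed", "law", "performance", "priority", "outcome"]
def pvPrereq : List String := ["guidance", "policy", "training", "infrastructure", "funding"]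
def pvAll : List String := pvCausal ++ pvShared ++ pvPrereq

-- Source B's _hits: one left-to-right scan of s; at each position i, every keyword starting there
-- is added to the hit set.  The set is kept as a list of distinct strings.
-- s.startswith(kw, i) with 0 ≤ i ≤ len(s) is exactly 'kw.toList <+: s.toList.drop i',
-- ported via PySem.Chars.startswith on the dropped character list.
def pvHits (s : String) (keywords : List String) : List String :=
  (List.range (s.toList.length + 1)).foldl
    (fun found i =>
      keywords.foldl
        (fun f kw =>
          if !(f.contains kw) && PySem.Chars.startswith (s.toList.drop i) kw.toList then
            f ++ [kw]
          else f)
        found)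
    []

def infer_alignment_alt (enabling : String) (dependent : String) : Option String × Option Int :=
  let e := PySem.Str.lower enabling
  let d := PySem.Str.lower dependent
  let he := pvHits e pvAll
  if he.filter (fun kw => pvCausal.contains kw) ≠ [] then
    (some (enabling ++ " provides a critical input or reduces risk for " ++ dependent), some 85)
  else if he.filter (fun kw => pvShared.contains kw && (pvHits d pvShared).contains kw) ≠ [] then
    (some "Both components serve a shared outcome or legal requirement", some 75)
  else if he.filter (fun kw => pvPrereq.contains kw) ≠ [] then
    (some (enabling ++ " is a prerequisite for effective delivery of " ++ dependent), some 70)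
  else
    (none, none)

-- ===== PRECONDITION & SPEC =====
def Spec_infer_alignment (enabling : String) (dependent : String) (out : Option String × Option Int) : Prop := out = infer_alignment_alt enabling dependent
instance (enabling : String) (dependent : String) (out : Option String × Option Int) : Decidable (Spec_infer_alignment enabling dependent out) := by unfold Spec_infer_alignment; infer_instance

-- ===== CLAIM (what is proved, stated in full; the proofs are below) =====
def Claim_equal_infer_alignment : Prop := ∀ (enabling : String) (dependent : String), Dom_infer_alignment enabling dependent → Spec_infer_alignment enabling dependent (infer_alignment enabling dependent)

-- ===== LEMMAS AND PROOFS =====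

-- membership after the inner fold (one position, all keywords)
theorem pv_inner_mem (s : List Char) (i : Nat) (kws : List String) :
    ∀ (found : List String) (x : String),
      x ∈ kws.foldl
        (fun f kw =>
          if !(f.contains kw) && PySem.Chars.startswith (s.drop i) kw.toList then f ++ [kw] else f)
        found ↔
      x ∈ found ∨ (x ∈ kws ∧ PySem.Chars.startswith (s.drop i) x.toList = true) := by
  induction kws with
  | nil => simp
  | cons kw rest ih =>
    intro found x
    simp only [List.foldl_cons]
    rw [ih]
    cases hmb : found.contains kw with
    | true =>
      have hkf : kw ∈ found := by simpa using hmb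
      simp only [Bool.not_true, Bool.false_and, Bool.false_eq_true, if_false, List.mem_cons]
      constructor
      · rintro (h | ⟨hk, hs⟩)
        · exact Or.inl h
        · exact Or.inr ⟨Or.inr hk, hs⟩
      · rintro (h | ⟨(rfl | hk), hs⟩)
        · exact Or.inl h
        · exact Or.inl hkf
        · exact Or.inr ⟨hk, hs⟩
    | false =>
      cases hsb : PySem.Chars.startswith (s.drop i) kw.toList with
      | true =>
        simp only [Bool.not_false, Bool.true_and, if_true, List.mem_append,
          List.mem_cons, List.not_mem_nil, or_false]
        constructor
        · rintro ((h | rfl) | ⟨hk, hs⟩)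
          · exact Or.inl h
          · exact Or.inr ⟨Or.inl rfl, hsb⟩
          · exact Or.inr ⟨Or.inr hk, hs⟩
        · rintro (h | ⟨(rfl | hk), hs⟩)
          · exact Or.inl (Or.inl h)
          · exact Or.inl (Or.inr rfl)
          · exact Or.inr ⟨hk, hs⟩
      | false =>
        simp only [hsb, Bool.not_false, Bool.true_and, Bool.false_eq_true, if_false,
          List.mem_cons]
        constructor
        · rintro (h | ⟨hk, hs⟩)
          · exact Or.inl h
          · exact Or.inr ⟨Or.inr hk, hs⟩
        · rintro (h | ⟨(rfl | hk), hs⟩)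
          · exact Or.inl h
          · exact absurd hs (by simp [hsb])
          · exact Or.inr ⟨hk, hs⟩

-- membership after the outer fold over positions 0..n-1
theorem pv_outer_mem (s : List Char) (kws : List String) :
    ∀ (n : Nat) (found : List String) (x : String),
      x ∈ (List.range n).foldl
        (fun found i =>
          kws.foldl
            (fun f kw =>
              if !(f.contains kw) && PySem.Chars.startswith (s.drop i) kw.toList then f ++ [kw] else f)
            found)
        found ↔
      x ∈ found ∨ (x ∈ kws ∧ ∃ i < n, PySem.Chars.startswith (s.drop i) x.toList = true) := by
  intro n
  induction n with
  | zero => simp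
  | succ n ih =>
    intro found x
    rw [List.range_succ, List.foldl_append, List.foldl_cons, List.foldl_nil, pv_inner_mem, ih]
    constructor
    · rintro ((h | ⟨hk, i, hi, hs⟩) | ⟨hk, hs⟩)
      · exact Or.inl h
      · exact Or.inr ⟨hk, i, Nat.lt_succ_of_lt hi, hs⟩
      · exact Or.inr ⟨hk, n, Nat.lt_succ_self n, hs⟩
    · rintro (h | ⟨hk, i, hi, hs⟩)
      · exact Or.inl (Or.inl h)
      · rcases Nat.lt_succ_iff_lt_or_eq.mp hi with h' | rfl
        · exact Or.inl (Or.inr ⟨hk, i, h', hs⟩)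
        · exact Or.inr ⟨hk, hs⟩

-- the bounded position scan finds exactly the substrings
theorem pv_hits_mem (s : String) (kws : List String) (x : String) :
    x ∈ pvHits s kws ↔ x ∈ kws ∧ PySem.Str.isIn x s = true := by
  unfold pvHits
  rw [pv_outer_mem]
  simp only [List.not_mem_nil, false_or]
  constructor
  · rintro ⟨hk, i, _, hs⟩
    refine ⟨hk, ?_⟩
    rw [PySem.Str.isIn_eq, ← PySem.Chars.exists_prefix_drop_iff_isIn]
    exact ⟨i, (PySem.Chars.startswith_iff _ _).mp hs⟩
  · rintro ⟨hk, hin⟩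
    refine ⟨hk, ?_⟩
    rw [PySem.Str.isIn_eq, ← PySem.Chars.exists_prefix_drop_iff_isIn] at hin
    obtain ⟨j, hj⟩ := hin
    by_cases hle : j ≤ s.toList.length
    · exact ⟨j, Nat.lt_succ_of_le hle, (PySem.Chars.startswith_iff _ _).mpr hj⟩
    · refine ⟨s.toList.length, Nat.lt_succ_self _, (PySem.Chars.startswith_iff _ _).mpr ?_⟩
      rw [List.drop_of_length_le (le_refl _)]
      rwa [List.drop_of_length_le (Nat.le_of_not_lt (by omega))] at hj

-- a nonempty filter of the hit set over a sublist of the keyword table ↔ 'any' over that sublist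
theorem pv_filter_hits (s : String) (sub : List String) (hsub : ∀ x ∈ sub, x ∈ pvAll) :
    ((pvHits s pvAll).filter (fun kw => sub.contains kw) ≠ []) ↔
      sub.any (fun v => PySem.Str.isIn v s) = true := by
  rw [Ne, List.filter_eq_nil_iff, List.any_eq_true]
  push_neg
  constructor
  · rintro ⟨x, hx, hsx⟩
    rcases (pv_hits_mem s pvAll x).mp hx with ⟨_, hin⟩
    exact ⟨x, by simpa using hsx, hin⟩
  · rintro ⟨x, hx, hin⟩
    exact ⟨x, (pv_hits_mem s pvAll x).mpr ⟨hsub x hx, hin⟩, by simpa using hx⟩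

theorem pv_filter_hits2 (e d : String) :
    ((pvHits e pvAll).filter (fun kw => pvShared.contains kw && (pvHits d pvShared).contains kw) ≠ []) ↔
      pvShared.any (fun w => PySem.Str.isIn w e && PySem.Str.isIn w d) = true := by
  rw [Ne, List.filter_eq_nil_iff, List.any_eq_true]
  push_neg
  constructor
  · rintro ⟨x, hx, hp⟩
    rcases (pv_hits_mem e pvAll x).mp hx with ⟨_, hine⟩
    simp only [Bool.and_eq_true, List.contains_eq_mem, decide_eq_true_eq] at hp
    rcases hp with ⟨hxs, hxd⟩
    rcases (pv_hits_mem d pvShared x).mp (by simpa using hxd) with ⟨_, hind⟩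
    refine ⟨x, hxs, ?_⟩
    simp only [Bool.and_eq_true]
    exact ⟨hine, hind⟩
  · rintro ⟨x, hx, hin⟩
    simp only [Bool.and_eq_true] at hin
    refine ⟨x, (pv_hits_mem e pvAll x).mpr ⟨by simp [pvAll, hx], hin.1⟩, ?_⟩
    simp only [Bool.and_eq_true, List.contains_eq_mem, decide_eq_true_eq]
    exact ⟨hx, (pv_hits_mem d pvShared x).mpr ⟨hx, hin.2⟩⟩

-- ===== VERDICT (by name: the statement is the Claim_ definition above) =====
theorem infer_alignment_spec : Claim_equal_infer_alignment := by
  intro enabling dependent _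
  unfold Spec_infer_alignment infer_alignment infer_alignment_alt
  have hc : ∀ x ∈ pvCausal, x ∈ pvAll := by intro x hx; simp [pvAll, hx]
  have hp : ∀ x ∈ pvPrereq, x ∈ pvAll := by intro x hx; simp [pvAll, hx]
  have h1 := pv_filter_hits (PySem.Str.lower enabling) pvCausal hc
  have h2 := pv_filter_hits2 (PySem.Str.lower enabling) (PySem.Str.lower dependent)
  have h3 := pv_filter_hits (PySem.Str.lower enabling) pvPrereq hp
  simp only [pvCausal, pvShared, pvPrereq] at h1 h2 h3
  simp only []
  rw [if_congr h1.symm rfl rfl, if_congr h2.symm rfl rfl, if_congr h3.symm rfl rfl]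
  simp only [pvCausal, pvShared, pvPrereq]
  rfl
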